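-- pv_equiv track=rewrite | github.com/mbh038/PE | PE_0581/PE_0581.py | squareFrees
-- ===== SOURCE A (Python) =====
-- def squareFrees(primes,maxpr, product, pindex):
--     pr = primes[pindex]
--     if pr < maxpr:
--         for val in squareFrees(primes,maxpr, product, pindex+1):
--             yield val
--         for val in squareFrees(primes,maxpr, product*pr, pindex+1):
--             yield val
--     else:
--         yield product
--         yield product*maxpr
-- ===== SOURCE B (Python) =====
-- def squareFrees(primes, maxpr, product, pindex):
--     # collect the run of primes below maxpr starting at pindex, then maxpr itself
--     factors = []
--     j = pindex
--     while primes[j] < maxpr: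
--         factors.append(primes[j])
--         j += 1
--     factors.append(maxpr)
--     # iterative subset doubling, fastest-changing factor first
--     out = [product]
--     for f in reversed(factors):
--         out = out + [v * f for v in out]
--     return out
-- ===== Notes on version B (the rewrite author's own statement) =====
-- stated objective: alternative
-- what changed: Replaces A's recursive include/exclude generator by an iterative version: collect the factor run primes[pindex:] below maxpr plus maxpr, then build the full list by subset doubling (out = out + [v*f for v in out]) over the reversed factor list.
import Mathlib
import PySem

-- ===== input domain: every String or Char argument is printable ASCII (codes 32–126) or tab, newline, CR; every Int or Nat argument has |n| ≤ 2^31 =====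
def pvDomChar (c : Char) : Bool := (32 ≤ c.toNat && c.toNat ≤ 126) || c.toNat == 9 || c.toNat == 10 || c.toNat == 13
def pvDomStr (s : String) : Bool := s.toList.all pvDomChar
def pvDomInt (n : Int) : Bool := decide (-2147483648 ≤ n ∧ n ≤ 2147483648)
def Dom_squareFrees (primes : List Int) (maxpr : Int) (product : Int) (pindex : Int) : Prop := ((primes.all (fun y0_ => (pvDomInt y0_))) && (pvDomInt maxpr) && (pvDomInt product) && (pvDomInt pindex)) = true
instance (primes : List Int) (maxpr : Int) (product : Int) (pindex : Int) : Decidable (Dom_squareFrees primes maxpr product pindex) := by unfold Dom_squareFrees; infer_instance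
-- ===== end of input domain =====

-- B replaces A's recursive include/exclude branching by first collecting the factor run
-- and then building the output list by iterative subset doubling (objective: alternative,
-- non-recursive decomposition of the same enumeration; return value only — both are generators/lists in Python).

-- ===== PORT A =====
-- literal port of A's recursive generator; the branch where primes[pindex] raises IndexError
-- returns [] and is excluded by Pre_.
def squareFrees (primes : List Int) (maxpr : Int) (product : Int) (pindex : Int) : List Int :=
  match h : PySem.List.pyGet? primes pindex with
  | none => []
  | some pr =>
    if pr < maxpr then
      squareFrees primes maxpr product (pindex + 1) ++
      squareFrees primes maxpr (product * pr) (pindex + 1)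
    else
      [product, product * maxpr]
termination_by ((primes.length : Int) - pindex).toNat
decreasing_by
  all_goals
    have : ¬ (PySem.List.pyGet? primes pindex = none) := by simp [h]
    rw [PySem.List.pyGet?_eq_none_iff] at this
    simp [PySem.Raise.InRange] at this
    omega

-- ===== PORT B =====
-- B's while loop collecting primes[j] while primes[j] < maxpr (none = Source B raises IndexError)
def collectFactors (primes : List Int) (maxpr : Int) (pindex : Int) : Option (List Int) :=
  match h : PySem.List.pyGet? primes pindex with
  | none => none
  | some pr =>
    if pr < maxpr then
      (collectFactors primes maxpr (pindex + 1)).map (fun fs => pr :: fs)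
    else
      some []
termination_by ((primes.length : Int) - pindex).toNat
decreasing_by
  all_goals
    have : ¬ (PySem.List.pyGet? primes pindex = none) := by simp [h]
    rw [PySem.List.pyGet?_eq_none_iff] at this
    simp [PySem.Raise.InRange] at this
    omega

def squareFrees_alt (primes : List Int) (maxpr : Int) (product : Int) (pindex : Int) : List Int :=
  match collectFactors primes maxpr pindex with
  | none => []   -- Source B raises here; outside Pre_
  | some fs =>
    ((fs ++ [maxpr]).reverse).foldl (fun out f => out ++ out.map (fun v => v * f)) [product]

-- ===== PRECONDITION & SPEC =====
-- Pre_: exactly the inputs on which A's generator yields without IndexError: pindex is a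
-- valid (possibly negative) index and some prime at a position ≥ pindex is ≥ maxpr.
def Pre_squareFrees (primes : List Int) (maxpr : Int) (product : Int) (pindex : Int) : Prop :=
  -(primes.length : Int) ≤ pindex ∧ pindex < primes.length ∧
  ∃ j ∈ List.range primes.length, pindex ≤ (j : Int) ∧ maxpr ≤ primes.getD j 0
instance (primes : List Int) (maxpr : Int) (product : Int) (pindex : Int) : Decidable (Pre_squareFrees primes maxpr product pindex) := by unfold Pre_squareFrees; infer_instance

def pvWitness_squareFrees : List Int × Int × Int × Int := ([2, 3, 5], 5, 1, 0)

def Spec_squareFrees (primes : List Int) (maxpr : Int) (product : Int) (pindex : Int) (out : List Int) : Prop := out = squareFrees_alt primes maxpr product pindex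
instance (primes : List Int) (maxpr : Int) (product : Int) (pindex : Int) (out : List Int) : Decidable (Spec_squareFrees primes maxpr product pindex out) := by unfold Spec_squareFrees; infer_instance

-- ===== CLAIM (what is proved, stated in full; the proofs are below) =====
def Claim_equal_squareFrees : Prop := ∀ (primes : List Int) (maxpr : Int) (product : Int) (pindex : Int), Dom_squareFrees primes maxpr product pindex → Pre_squareFrees primes maxpr product pindex → Spec_squareFrees primes maxpr product pindex (squareFrees primes maxpr product pindex)

-- ===== LEMMAS AND PROOFS =====

-- E p F: the include/exclude enumeration over the factor list F (the shared specification)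
def subsetEnum (p : Int) : List Int → List Int
  | [] => [p]
  | f :: fs => subsetEnum p fs ++ subsetEnum (p * f) fs

theorem subsetEnum_map_mul (c : Int) (fs : List Int) :
    ∀ p, (subsetEnum p fs).map (fun v => v * c) = subsetEnum (p * c) fs := by
  induction fs with
  | nil => intro p; simp [subsetEnum]
  | cons f fs ih =>
      intro p
      simp [subsetEnum, ih]
      have : p * f * c = p * c * f := by ring
      rw [this]

-- B's doubling fold equals the enumeration
theorem foldl_double_eq_subsetEnum (fs : List Int) :
    ∀ p, (fs.reverse).foldl (fun out f => out ++ out.map (fun v => v * f)) [p]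
      = subsetEnum p fs := by
  induction fs with
  | nil => intro p; simp [subsetEnum]
  | cons f fs ih =>
      intro p
      simp only [List.reverse_cons, List.foldl_append, List.foldl_cons, List.foldl_nil]
      rw [ih p, subsetEnum, subsetEnum_map_mul]

-- Pre_ guarantees B's factor collection terminates with a value
theorem collectFactors_isSome (primes : List Int) (maxpr : Int) (pindex : Int)
    (h1 : -(primes.length : Int) ≤ pindex) (h2 : pindex < primes.length)
    (h3 : ∃ j ∈ List.range primes.length, pindex ≤ (j : Int) ∧ maxpr ≤ primes.getD j 0) :
    ∃ fs, collectFactors primes maxpr pindex = some fs := by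
  have hmeas : (((primes.length : Int) - pindex).toNat) = ((primes.length : Int) - pindex).toNat := rfl
  clear hmeas
  induction hn : (((primes.length : Int) - pindex).toNat) using Nat.strong_induction_on
    generalizing pindex with
  | _ n ih =>
  rw [collectFactors]
  obtain ⟨j, hjr, hjp, hjv⟩ := h3
  simp only [List.mem_range] at hjr
  have hget : ∃ pr, PySem.List.pyGet? primes pindex = some pr := by
    rcases Option.eq_none_or_eq_some (PySem.List.pyGet? primes pindex) with h | h
    · rw [PySem.List.pyGet?_eq_none_iff] at h
      exact absurd ⟨h1, h2⟩ h
    · exact h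
  obtain ⟨pr, hpr⟩ := hget
  rw [hpr]
  by_cases hlt : pr < maxpr
  · simp only [hlt, if_true]
    -- establish Pre_-style facts for pindex + 1
    have hne : pindex + 1 < (primes.length : Int) := by
      by_contra hc
      push_neg at hc
      -- then pindex = length - 1; with 0 ≤ pindex the witness j must equal pindex
      by_cases hp0 : 0 ≤ pindex
      · have : (j : Int) = pindex := by omega
        have hjn : j = pindex.toNat := by omega
        have : pr = primes.getD j 0 := by
          rw [hjn]
          have := PySem.List.pyGet?_of_nonneg (xs := primes) (i := pindex) hp0
          rw [this] at hpr
          have hlen : pindex.toNat < primes.length := by omega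
          simp [List.getD, List.getElem?_eq_getElem hlen] at hpr ⊢
          exact hpr.symm
        omega
      · omega
    have h1' : -(primes.length : Int) ≤ pindex + 1 := by omega
    have h3' : ∃ j ∈ List.range primes.length, pindex + 1 ≤ (j : Int) ∧ maxpr ≤ primes.getD j 0 := by
      by_cases hp0 : 0 ≤ pindex
      · refine ⟨j, by simp [hjr], ?_, hjv⟩
        -- j ≠ pindex since primes[j] ≥ maxpr > pr = primes[pindex]
        rcases lt_or_ge pindex (j : Int) with h | h
        · omega
        · exfalso
          have hje : (j : Int) = pindex := by omega
          have := PySem.List.pyGet?_of_nonneg (xs := primes) (i := pindex) hp0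
          rw [this] at hpr
          have hlen : pindex.toNat < primes.length := by omega
          have hjn : j = pindex.toNat := by omega
          rw [hjn] at hjv
          simp [List.getD, List.getElem?_eq_getElem hlen] at hjv hpr
          omega
      · refine ⟨j, by simp [hjr], by omega, hjv⟩
    obtain ⟨fs, hfs⟩ := ih (((primes.length : Int) - (pindex + 1)).toNat)
      (by omega) (pindex + 1) h1' hne h3' rfl
    exact ⟨pr :: fs, by rw [hfs]; rfl⟩
  · exact ⟨[], by simp [hlt]⟩

-- A equals the enumeration over the collected factors (plus maxpr)
theorem squareFrees_eq_subsetEnum (primes : List Int) (maxpr : Int) :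
    ∀ fs pindex product, collectFactors primes maxpr pindex = some fs →
      squareFrees primes maxpr product pindex = subsetEnum product (fs ++ [maxpr]) := by
  intro fs
  induction fs with
  | nil =>
      intro pindex product hc
      rw [collectFactors] at hc
      rw [squareFrees]
      rcases hpr : PySem.List.pyGet? primes pindex with _ | pr
      · rw [hpr] at hc; simp at hc
      · rw [hpr] at hc
        by_cases hlt : pr < maxpr
        · simp only [hlt, if_true] at hc
          rcases hrec : collectFactors primes maxpr (pindex + 1) with _ | fs'
          · rw [hrec] at hc; simp at hc
          · rw [hrec] at hc; simp at hc
        · simp [hlt] at hc ⊢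
          simp [subsetEnum]
  | cons f fs ih =>
      intro pindex product hc
      rw [collectFactors] at hc
      rw [squareFrees]
      rcases hpr : PySem.List.pyGet? primes pindex with _ | pr
      · rw [hpr] at hc; simp at hc
      · rw [hpr] at hc
        by_cases hlt : pr < maxpr
        · simp only [hlt, if_true] at hc
          rcases hrec : collectFactors primes maxpr (pindex + 1) with _ | fs'
          · rw [hrec] at hc; simp at hc
          · rw [hrec] at hc
            simp at hc
            obtain ⟨hpf, hfs⟩ := hc
            subst hpf hfs
            simp only [hlt, if_true]
            rw [ih _ product hrec, ih _ (product * pr) hrec]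
            simp [subsetEnum]
        · simp [hlt] at hc

-- ===== VERDICT (by name: the statement is the Claim_ definition above) =====
theorem squareFrees_spec : Claim_equal_squareFrees := by
  intro primes maxpr product pindex _hdom hpre
  obtain ⟨h1, h2, h3⟩ := hpre
  obtain ⟨fs, hfs⟩ := collectFactors_isSome primes maxpr pindex h1 h2 h3
  unfold Spec_squareFrees squareFrees_alt
  rw [hfs, squareFrees_eq_subsetEnum primes maxpr fs pindex product hfs]
  exact (foldl_double_eq_subsetEnum (fs ++ [maxpr]) product).symm
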